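-- pv_equiv track=rewrite | github.com/abdulhathi/dsa-in-python | 14-queue/03-generate-numbers-with-given-digits/03-generate-numbers-with-given-digits.py | generate_k_nums_with_given_digits
-- ===== SOURCE A (Python) =====
-- from collections import deque
--
-- def generate_k_nums_with_given_digits(digits, k):
--   q = deque()
--   for digit in digits:
--     q.append(str(digit))
--
--   res = []
--   while k > 0 and q:
--     k -= 1
--     curr = q.popleft()
--     res.append(curr)
--     for digit in digits:
--       q.append(f"{digit}{curr}")
--   return res
-- ===== SOURCE B (Python) =====
-- def generate_k_nums_with_given_digits(digits, k):
--   ds = [str(d) for d in digits]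
--   base = len(ds)
--   if base == 0:
--     return []
--   res = []
--   for i in range(1, k + 1):
--     n, s = i, ""
--     while n:
--       n, r = divmod(n - 1, base)
--       s += ds[r]
--     res.append(s)
--   return res
-- ===== Notes on version B (the rewrite author's own statement) =====
-- stated objective: faster
-- what changed: Replaces the BFS queue (which materialises d children strings per emitted number) with direct bijective base-d numeration: the i-th output is computed arithmetically via repeated divmod(n-1, d).
import Mathlib
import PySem

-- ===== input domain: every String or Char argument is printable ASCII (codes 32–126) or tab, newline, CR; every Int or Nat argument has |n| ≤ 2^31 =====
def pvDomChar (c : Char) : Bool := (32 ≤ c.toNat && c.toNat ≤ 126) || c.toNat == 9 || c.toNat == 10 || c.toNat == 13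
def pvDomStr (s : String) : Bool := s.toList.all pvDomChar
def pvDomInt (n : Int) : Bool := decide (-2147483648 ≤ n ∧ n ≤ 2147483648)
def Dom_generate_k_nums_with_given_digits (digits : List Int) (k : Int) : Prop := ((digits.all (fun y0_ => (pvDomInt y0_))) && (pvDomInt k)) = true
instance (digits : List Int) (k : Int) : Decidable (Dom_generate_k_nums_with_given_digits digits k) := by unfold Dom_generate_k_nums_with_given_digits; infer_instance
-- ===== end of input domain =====

-- B replaces A's BFS queue with direct bijective base-d numeration of each of the first k outputs
-- (objective: faster — no d-fold fan-out of queue strings). Both ports proved to agree on all inputs.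

-- ===== PORT A =====
-- the while-loop of A: counter (remaining k), queue, accumulated result
def pvALoop (digits : List Int) : Nat → List String → List String → List String
  | 0, _, res => res
  | _ + 1, [], res => res
  | k + 1, curr :: q, res =>
      pvALoop digits k (q ++ digits.map (fun d => PySem.Int.toStr d ++ curr)) (res ++ [curr])

def generate_k_nums_with_given_digits (digits : List Int) (k : Int) : List String :=
  pvALoop digits k.toNat (digits.map (fun d => PySem.Int.toStr d)) []

-- ===== PORT B =====
-- the inner while-loop of B: bijective base-`base` encoding of n over digit strings ds
def pvEnc (ds : List String) (base : Nat) : Nat → String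
  | 0 => ""
  | n + 1 => ds.getD (n % base) "" ++ pvEnc ds base (n / base)
decreasing_by exact Nat.lt_succ_of_le (Nat.div_le_self n base)

def generate_k_nums_with_given_digits_alt (digits : List Int) (k : Int) : List String :=
  let ds := digits.map (fun d => PySem.Int.toStr d)
  if ds.length = 0 then []
  else (List.range k.toNat).map (fun i => pvEnc ds ds.length (i + 1))

-- ===== PRECONDITION & SPEC =====
def Spec_generate_k_nums_with_given_digits (digits : List Int) (k : Int) (out : List String) : Prop := out = generate_k_nums_with_given_digits_alt digits k
instance (digits : List Int) (k : Int) (out : List String) : Decidable (Spec_generate_k_nums_with_given_digits digits k out) := by unfold Spec_generate_k_nums_with_given_digits; infer_instance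

-- ===== CLAIM (what is proved, stated in full; the proofs are below) =====
def Claim_equal_generate_k_nums_with_given_digits : Prop := ∀ (digits : List Int) (k : Int), Dom_generate_k_nums_with_given_digits digits k → Spec_generate_k_nums_with_given_digits digits k (generate_k_nums_with_given_digits digits k)

-- ===== LEMMAS AND PROOFS =====

-- the child of node j via digit index r < base is node base*j + r + 1
theorem pvEnc_child (ds : List String) (base j r : Nat) (hr : r < base) :
    pvEnc ds base (base * j + r + 1) = ds.getD r "" ++ pvEnc ds base j := by
  rw [pvEnc]
  rw [Nat.mul_add_mod, Nat.mod_eq_of_lt hr, Nat.mul_add_div (Nat.pos_of_ne_zero (by omega)),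
    Nat.div_eq_of_lt hr, Nat.add_zero]

-- the batch of children A appends when popping pvEnc j is exactly the next `base` node encodings
theorem pv_children_eq (digits : List Int) (j : Nat) :
    digits.map (fun d => PySem.Int.toStr d ++ pvEnc (digits.map (fun d => PySem.Int.toStr d)) digits.length j)
      = (List.range' (digits.length * j + 1) digits.length).map
          (pvEnc (digits.map (fun d => PySem.Int.toStr d)) digits.length) := by
  apply List.ext_getElem
  · simp
  · intro r h1 h2
    simp only [List.getElem_map, List.getElem_range']
    have hr : r < digits.length := by simpa using h1
    have he : digits.length * j + 1 + 1 * r = digits.length * j + r + 1 := by ring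
    rw [he, pvEnc_child _ _ _ _ hr]
    congr 1
    rw [List.getD_eq_getElem _ _ (by simpa using hr)]
    simp

-- loop invariant: after i pops the queue holds encodings of i+1 .. (e+1)*i+(e+1) consecutively
theorem pvALoop_inv (digits : List Int) (e : Nat) (hd : digits.length = e + 1) :
    ∀ (k i : Nat) (res : List String),
      pvALoop digits k
        ((List.range' (i + 1) (e * i + e + 1)).map
          (pvEnc (digits.map (fun d => PySem.Int.toStr d)) digits.length)) res
      = res ++ (List.range' (i + 1) k).map
          (pvEnc (digits.map (fun d => PySem.Int.toStr d)) digits.length) := by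
  intro k
  induction k with
  | zero => intro i res; simp [pvALoop]
  | succ k ih =>
    intro i res
    set ds := digits.map (fun d => PySem.Int.toStr d) with hds
    rw [List.range'_succ]
    simp only [List.map_cons]
    rw [pvALoop]
    have hq : (List.range' (i + 2) (e * i + e)).map (pvEnc ds digits.length)
        ++ digits.map (fun d => PySem.Int.toStr d ++ pvEnc ds digits.length (i + 1))
        = (List.range' (i + 2) (e * (i + 1) + e + 1)).map (pvEnc ds digits.length) := by
      rw [pv_children_eq digits (i + 1), ← List.map_append]
      congr 1
      have h1 : digits.length * (i + 1) + 1 = (i + 2) + (e * i + e) := by rw [hd]; ring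
      have h2 : e * (i + 1) + e + 1 = (e * i + e) + digits.length := by rw [hd]; ring
      rw [h1, h2]
      have h3 := @List.range'_append (i + 2) (e * i + e) digits.length 1
      simp only [Nat.one_mul] at h3
      exact h3
    rw [hq, ih (i + 1) (res ++ [pvEnc ds digits.length (i + 1)])]
    rw [List.range'_succ, List.map_cons]
    simp
theorem pvALoop_nil (digits : List Int) : ∀ (k : Nat) (res : List String),
    pvALoop digits k [] res = res := by
  intro k res; cases k <;> rfl

-- ===== VERDICT (by name: the statement is the Claim_ definition above) =====
theorem generate_k_nums_with_given_digits_spec : Claim_equal_generate_k_nums_with_given_digits := by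
  intro digits k _
  unfold Spec_generate_k_nums_with_given_digits
  unfold generate_k_nums_with_given_digits generate_k_nums_with_given_digits_alt
  cases hdig : digits with
  | nil => simp [pvALoop_nil]
  | cons x xs =>
    rw [← hdig]
    have hd : digits.length = xs.length + 1 := by rw [hdig]; simp
    have hne : ¬ (digits.map (fun d => PySem.Int.toStr d)).length = 0 := by
      simp [hd]
    simp only [hne, ite_false]
    have hinit : digits.map (fun d => PySem.Int.toStr d)
        = (List.range' 1 (xs.length * 0 + xs.length + 1)).map
            (pvEnc (digits.map (fun d => PySem.Int.toStr d)) digits.length) := by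
      have h0 : xs.length * 0 + xs.length + 1 = digits.length := by omega
      have h := pv_children_eq digits 0
      simp only [Nat.mul_zero, Nat.zero_add] at h
      rw [h0, ← h]
      apply List.map_congr_left
      intro a _
      simp [pvEnc]
    calc pvALoop digits k.toNat (digits.map (fun d => PySem.Int.toStr d)) []
        = pvALoop digits k.toNat
            ((List.range' 1 (xs.length * 0 + xs.length + 1)).map
              (pvEnc (digits.map (fun d => PySem.Int.toStr d)) digits.length)) [] := by
          rw [← hinit]
      _ = [] ++ (List.range' 1 k.toNat).map
            (pvEnc (digits.map (fun d => PySem.Int.toStr d)) digits.length) :=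
          pvALoop_inv digits xs.length hd k.toNat 0 []
      _ = (List.range k.toNat).map (fun i =>
            pvEnc (digits.map (fun d => PySem.Int.toStr d))
              (digits.map (fun d => PySem.Int.toStr d)).length (i + 1)) := by
          rw [List.nil_append, List.range'_eq_map_range, List.map_map]
          apply List.map_congr_left
          intro a _
          simp only [Function.comp]
          rw [Nat.add_comm 1 a]
          congr 1
          simp
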